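-- pv_equiv track=rewrite | github.com/xhkwangtao/jyl | scripts/vectorize_jyl_secret_icons.py | merge_runs_to_rects
-- ===== SOURCE A (Python) =====
-- from typing import Iterable, List, Sequence, Tuple
--
-- def row_runs(row: Sequence[bool]) -> List[Tuple[int, int]]:
--     runs: List[Tuple[int, int]] = []
--     start = None
--     for idx, value in enumerate(row):
--         if value and start is None:
--             start = idx
--         elif not value and start is not None:
--             runs.append((start, idx))
--             start = None
--     if start is not None:
--         runs.append((start, len(row)))
--     return runs
--
-- def merge_runs_to_rects(mask: Sequence[Sequence[bool]]) -> List[Tuple[int, int, int, int]]: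
--     rects: List[Tuple[int, int, int, int]] = []
--     active: dict = {}
--
--     for y in range(len(mask) + 1):
--         runs = row_runs(mask[y]) if y < len(mask) else []
--         next_active = {}
--         for run in runs:
--             if run in active:
--                 next_active[run] = active[run]
--             else:
--                 next_active[run] = y
--         for run, start_y in active.items():
--             if run not in next_active:
--                 x0, x1 = run
--                 rects.append((x0, start_y, x1 - x0, y - start_y))
--         active = next_active
--
--     return rects
-- ===== SOURCE B (Python) =====
-- from typing import List, Sequence, Tuple
--
-- def row_runs(row: Sequence[bool]) -> List[Tuple[int, int]]:
--     runs: List[Tuple[int, int]] = []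
--     start = None
--     for idx, value in enumerate(row):
--         if value and start is None:
--             start = idx
--         elif not value and start is not None:
--             runs.append((start, idx))
--             start = None
--     if start is not None:
--         runs.append((start, len(row)))
--     return runs
--
-- def merge_runs_to_rects(mask: Sequence[Sequence[bool]]) -> List[Tuple[int, int, int, int]]:
--     # Stateless: a rectangle ends at row y exactly when its run is absent from
--     # row y+1; its top row is found by scanning the run's streak backwards.
--     runlists = [row_runs(row) for row in mask]
--     n = len(mask)
--
--     def streak_start(run: Tuple[int, int], s: int) -> int:
--         while s > 0 and run in runlists[s - 1]:
--             s -= 1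
--         return s
--
--     return [
--         (run[0], s, run[1] - run[0], y + 1 - s)
--         for y in range(n)
--         for run in runlists[y]
--         if y + 1 >= n or run not in runlists[y + 1]
--         for s in [streak_start(run, y)]
--     ]
-- ===== Notes on version B (the rewrite author's own statement) =====
-- stated objective: alternative
-- what changed: Replaces A's incremental row sweep that carries an 'active' dict of open runs across rows with a stateless pass: for each row, every run absent from the next row ends a rectangle whose top row is recovered by scanning that run's streak backwards through the precomputed per-row run lists.
import Mathlib
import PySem

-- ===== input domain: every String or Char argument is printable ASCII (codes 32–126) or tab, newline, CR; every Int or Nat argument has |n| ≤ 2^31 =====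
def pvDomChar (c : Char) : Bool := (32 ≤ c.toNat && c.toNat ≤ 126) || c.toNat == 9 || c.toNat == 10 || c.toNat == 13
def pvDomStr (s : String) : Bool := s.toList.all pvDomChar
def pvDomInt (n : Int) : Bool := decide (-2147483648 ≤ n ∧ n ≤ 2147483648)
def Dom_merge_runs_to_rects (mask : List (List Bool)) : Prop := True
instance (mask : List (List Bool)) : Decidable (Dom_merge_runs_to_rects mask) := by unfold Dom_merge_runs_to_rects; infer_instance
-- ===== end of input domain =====

-- B replaces A's incremental row sweep with a dict of active runs by a stateless
-- scan: a rectangle ends where its run is absent from the next row, and its top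
-- row is recovered by scanning the run's streak backwards (objective: alternative).

-- ===== PORT A =====
-- helper row_runs (shared by both Pythons; B reuses A's helper verbatim)
-- the body of row_runs' 'for idx, value in enumerate(row)' loop
def stepRuns (acc : List (Int × Int) × Option Int) (p : Int × Bool) :
    List (Int × Int) × Option Int :=
  match acc.2 with
  | none => if p.2 then (acc.1, some p.1) else (acc.1, none)
  | some s => if p.2 then (acc.1, some s) else (acc.1 ++ [(s, p.1)], none)

def rowRuns (row : List Bool) : List (Int × Int) :=
  let st := (PySem.List.enumerate row 0).foldl stepRuns ([], none)
  match st.2 with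
  | some s => st.1 ++ [(s, (row.length : Int))]
  | none => st.1

-- the body of A's 'for y in range(len(mask) + 1)' loop
def stepA (mask : List (List Bool))
    (st : List (Int × Int × Int × Int) × PySem.Dict (Int × Int) Int) (y : Nat) :
    List (Int × Int × Int × Int) × PySem.Dict (Int × Int) Int :=
  let runs := if y < mask.length then rowRuns (mask.getD y []) else []
  let nextActive := runs.foldl
    (fun na run =>
      match st.2.get? run with
      | some s => na.insert run s
      | none => na.insert run (y : Int)) PySem.Dict.empty
  let rects := st.2.items.foldl
    (fun r p =>
      if nextActive.contains p.1 then r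
      else r ++ [(p.1.1, p.2, p.1.2 - p.1.1, (y : Int) - p.2)]) st.1
  (rects, nextActive)

def merge_runs_to_rects (mask : List (List Bool)) : List (Int × Int × Int × Int) :=
  ((List.range (mask.length + 1)).foldl (stepA mask) ([], PySem.Dict.empty)).1

-- ===== PORT B =====
-- B's while loop: from s, step back while the run occurs in the previous row
def streakStart (runlists : List (List (Int × Int))) (run : Int × Int) : Nat → Nat
  | 0 => 0
  | s + 1 => if run ∈ runlists.getD s [] then streakStart runlists run s else s + 1

-- one row of B's comprehension
def termB (runlists : List (List (Int × Int))) (n : Nat) (y : Nat) :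
    List (Int × Int × Int × Int) :=
  (runlists.getD y []).filterMap (fun run =>
    if n ≤ y + 1 ∨ run ∉ runlists.getD (y + 1) [] then
      let s := streakStart runlists run y
      some (run.1, (s : Int), run.2 - run.1, (y : Int) + 1 - (s : Int))
    else none)

def merge_runs_to_rects_alt (mask : List (List Bool)) : List (Int × Int × Int × Int) :=
  let runlists := mask.map rowRuns
  (List.range mask.length).flatMap (termB runlists mask.length)

-- ===== PRECONDITION & SPEC =====
def Spec_merge_runs_to_rects (mask : List (List Bool)) (out : List (Int × Int × Int × Int)) : Prop := out = merge_runs_to_rects_alt mask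
instance (mask : List (List Bool)) (out : List (Int × Int × Int × Int)) : Decidable (Spec_merge_runs_to_rects mask out) := by unfold Spec_merge_runs_to_rects; infer_instance

-- ===== CLAIM (what is proved, stated in full; the proofs are below) =====
def Claim_equal_merge_runs_to_rects : Prop := ∀ (mask : List (List Bool)), Dom_merge_runs_to_rects mask → Spec_merge_runs_to_rects mask (merge_runs_to_rects mask)

-- ===== LEMMAS AND PROOFS =====

-- the runs of row y (empty past the end), as both programs see them
def Rrow (mask : List (List Bool)) (y : Nat) : List (Int × Int) :=
  if y < mask.length then rowRuns (mask.getD y []) else []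

-- A's 'active' dict after processing loop index y, described in closed form
def dictOf (mask : List (List Bool)) (y : Nat) : PySem.Dict (Int × Int) Int :=
  PySem.Dict.mk ((Rrow mask y).map
    (fun run => (run, (streakStart (mask.map rowRuns) run y : Int))))

lemma getD_map_rowRuns (mask : List (List Bool)) (y : Nat) :
    (mask.map rowRuns).getD y [] = Rrow mask y := by
  unfold Rrow
  by_cases h : y < mask.length
  · simp [h, List.getD]
  · simp [List.getD, h]

-- invariant of row_runs' loop: runs are disjoint left-to-right, in-bounds
def runsInv (s : Int) (st : List (Int × Int) × Option Int) : Prop :=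
  List.Pairwise (fun a b => a.2 ≤ b.1) st.1 ∧
  (∀ r ∈ st.1, r.1 < r.2 ∧ r.2 ≤ s) ∧
  (∀ v, st.2 = some v → (∀ r ∈ st.1, r.2 ≤ v) ∧ v < s)

lemma stepRuns_inv (s : Int) (st : List (Int × Int) × Option Int) (b : Bool)
    (h : runsInv s st) : runsInv (s + 1) (stepRuns st (s, b)) := by
  obtain ⟨runs, start⟩ := st
  obtain ⟨h1, h2, h3⟩ := h
  have hb2 : ∀ r ∈ runs, r.1 < r.2 ∧ r.2 ≤ s + 1 := fun r hr =>
    ⟨(h2 r hr).1, by have := (h2 r hr).2; omega⟩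
  cases start with
  | none =>
    cases b with
    | false =>
      have e : stepRuns (runs, none) (s, false) = (runs, none) := rfl
      rw [e]; exact ⟨h1, hb2, by simp⟩
    | true =>
      have e : stepRuns (runs, none) (s, true) = (runs, some s) := rfl
      rw [e]
      exact ⟨h1, hb2, fun v hv => by
        simp only [Option.some.injEq] at hv; subst hv
        exact ⟨fun r hr => (h2 r hr).2, by omega⟩⟩
  | some v =>
    obtain ⟨hv1, hv2⟩ := h3 v rfl
    cases b with
    | true =>
      have e : stepRuns (runs, some v) (s, true) = (runs, some v) := rfl
      rw [e]
      exact ⟨h1, hb2, fun w hw => by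
        simp only [Option.some.injEq] at hw; subst hw; exact ⟨hv1, by omega⟩⟩
    | false =>
      have e : stepRuns (runs, some v) (s, false) = (runs ++ [(v, s)], none) := rfl
      rw [e]
      refine ⟨?_, ?_, by simp⟩
      · rw [List.pairwise_append]
        exact ⟨h1, List.pairwise_singleton _ _, fun a ha c hc => by
          simp at hc; subst hc; exact hv1 a ha⟩
      · intro r hr
        rcases List.mem_append.1 hr with hr | hr
        · exact hb2 r hr
        · simp at hr; subst hr; exact ⟨hv2, by omega⟩

lemma foldl_stepRuns_inv (row : List Bool) : ∀ (s : Int)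
    (st : List (Int × Int) × Option Int), runsInv s st →
    runsInv (s + row.length) ((PySem.List.enumerate row s).foldl stepRuns st) := by
  induction row with
  | nil => intro s st h; simpa [PySem.List.enumerate_nil] using h
  | cons b row ih =>
    intro s st h
    rw [PySem.List.enumerate_cons, List.foldl_cons]
    have := ih (s + 1) _ (stepRuns_inv s st b h)
    have harith : s + ((b :: row).length : Int) = s + 1 + (row.length : Int) := by
      simp [List.length_cons]; ring
    rw [harith]
    exact this

lemma pairwise_rowRuns (row : List Bool) :
    List.Pairwise (fun a b => a.1 < b.1) (rowRuns row) := by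
  have hinv : runsInv (0 : Int) (([], none) : List (Int × Int) × Option Int) := by
    refine ⟨List.Pairwise.nil, by simp, by simp⟩
  have h := foldl_stepRuns_inv row 0 ([], none) hinv
  rw [zero_add] at h
  obtain ⟨h1, h2, h3⟩ := h
  have key : ∀ (l : List (Int × Int)), List.Pairwise (fun a b => a.2 ≤ b.1) l →
      (∀ r ∈ l, r.1 < r.2) → List.Pairwise (fun a b => a.1 < b.1) l := by
    intro l hp hb
    exact hp.imp_of_mem (fun {a c} ha hc hle => lt_of_lt_of_le (hb a ha) hle)
  unfold rowRuns
  cases hs : ((PySem.List.enumerate row 0).foldl stepRuns ([], none)).2 with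
  | none =>
    simp only [hs]
    exact key _ h1 (fun r hr => (h2 r hr).1)
  | some v =>
    obtain ⟨hv1, hv2⟩ := h3 v hs
    simp only [hs]
    apply key
    · rw [List.pairwise_append]
      exact ⟨h1, List.pairwise_singleton _ _, fun a ha c hc => by
        simp at hc; subst hc; exact hv1 a ha⟩
    · intro r hr
      rcases List.mem_append.1 hr with hr | hr
      · exact (h2 r hr).1
      · simp at hr; subst hr; exact hv2

lemma nodup_rowRuns (row : List Bool) : (rowRuns row).Nodup :=
  (pairwise_rowRuns row).imp (fun {a b} h => fun e => by subst e; exact lt_irrefl _ h)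

lemma nodup_Rrow (mask : List (List Bool)) (y : Nat) : (Rrow mask y).Nodup := by
  unfold Rrow; split
  · exact nodup_rowRuns _
  · exact List.nodup_nil

lemma foldl_insert_fresh (l : List (Int × Int)) (g : (Int × Int) → Int) :
    ∀ (d : PySem.Dict (Int × Int) Int), l.Nodup → (∀ run ∈ l, run ∉ d.keys) →
    l.foldl (fun na run => na.insert run (g run)) d
      = PySem.Dict.mk (d.items ++ l.map (fun run => (run, g run))) := by
  induction l with
  | nil =>
    intro d _ _
    simp only [List.foldl_nil, List.map_nil, List.append_nil]
  | cons x l ih =>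
    intro d hnd hf
    have hxc : d.contains x = false := by
      have := hf x (List.mem_cons_self)
      rw [← Bool.not_eq_true, PySem.Dict.contains_iff_mem_keys]
      exact this
    have hins : d.insert x (g x) = PySem.Dict.mk (d.items ++ [(x, g x)]) := by
      calc d.insert x (g x) = PySem.Dict.mk (d.insert x (g x)).items := rfl
        _ = PySem.Dict.mk (d.items ++ [(x, g x)]) := by
            rw [PySem.Dict.items_insert_of_not_contains d (g x) hxc]
    rw [List.foldl_cons, hins,
      ih _ (List.nodup_cons.1 hnd).2 ?_]
    · simp
    · intro run hrun
      have hks : (PySem.Dict.mk (d.items ++ [(x, g x)])).keys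
          = d.keys ++ [x] := by
        rw [PySem.Dict.keys_mk, List.map_append]
        rfl
      rw [hks]
      simp only [List.mem_append, List.mem_singleton]
      rintro (hk | hk)
      · exact hf run (List.mem_cons_of_mem _ hrun) hk
      · exact (List.nodup_cons.1 hnd).1 (hk ▸ hrun)

lemma keys_dictOf (mask : List (List Bool)) (y : Nat) :
    (dictOf mask y).keys = Rrow mask y := by
  unfold dictOf
  rw [PySem.Dict.keys_mk, List.map_map]
  simp [Function.comp_def]

lemma get?_dictOf (mask : List (List Bool)) (y : Nat) (run : Int × Int) :
    (dictOf mask y).get? run =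
      if run ∈ Rrow mask y
      then some ((streakStart (mask.map rowRuns) run y : Int)) else none := by
  split
  next hmem =>
    apply PySem.Dict.get?_of_mem_items
    · exact List.mem_map.2 ⟨run, hmem, rfl⟩
    · rw [keys_dictOf]; exact nodup_Rrow mask y
  next hmem =>
    rw [PySem.Dict.get?_eq_none_iff_not_mem_keys, keys_dictOf]
    exact hmem

lemma filterMap_ite {α β : Type} (p : α → Prop) [DecidablePred p] (f : α → β)
    (l : List α) :
    (l.filterMap fun x => if p x then some (f x) else none)
      = (l.filter (fun x => decide (p x))).map f := by
  induction l with
  | nil => rfl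
  | cons a l ih => by_cases h : p a <;> simp [h, ih]

lemma loop_inv (mask : List (List Bool)) : ∀ y, y ≤ mask.length →
    (List.range (y + 1)).foldl (stepA mask) ([], PySem.Dict.empty)
      = ((List.range y).flatMap (termB (mask.map rowRuns) mask.length),
         dictOf mask y) := by
  intro y
  induction y with
  | zero =>
    intro _
    rw [List.range_one, List.foldl_cons, List.foldl_nil]
    simp only [stepA, List.range_zero, List.flatMap_nil]
    refine Prod.ext ?_ ?_
    · rfl
    · show (if 0 < mask.length then rowRuns (mask.getD 0 []) else []).foldl _ _ = _
      have hfun : (fun (na : PySem.Dict (Int × Int) Int) run =>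
          match PySem.Dict.empty.get? (κ := Int × Int) (ν := Int) run with
          | some s => na.insert run s
          | none => na.insert run ((0 : Nat) : Int))
          = fun na run => na.insert run ((streakStart (mask.map rowRuns) run 0 : Int)) := rfl
      rw [hfun,
        show (if 0 < mask.length then rowRuns (mask.getD 0 []) else [])
          = Rrow mask 0 from rfl]
      rw [foldl_insert_fresh _ _ _ (nodup_Rrow mask 0)
        (by intro run _; simp [PySem.Dict.keys_empty])]
      rfl
  | succ y ih =>
    intro hy
    rw [List.range_succ, List.foldl_append, ih (by omega), List.foldl_cons,
      List.foldl_nil]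
    rw [List.range_succ, List.flatMap_append, List.flatMap_cons, List.flatMap_nil,
      List.append_nil]
    simp only [stepA]
    have hcast : (((y + 1 : Nat)) : Int) = (y : Int) + 1 := by push_cast; ring
    have hfun : (fun (na : PySem.Dict (Int × Int) Int) run =>
        match (dictOf mask y).get? run with
        | some s => na.insert run s
        | none => na.insert run (((y + 1 : Nat)) : Int))
        = fun na run =>
            na.insert run ((streakStart (mask.map rowRuns) run (y + 1) : Int)) := by
      funext na run
      rw [get?_dictOf]
      by_cases h : run ∈ Rrow mask y
      · rw [if_pos h]
        have hs : streakStart (mask.map rowRuns) run (y + 1)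
            = streakStart (mask.map rowRuns) run y := by
          simp only [streakStart]
          rw [getD_map_rowRuns]
          simp [h]
        rw [hs]
      · rw [if_neg h]
        have hs : streakStart (mask.map rowRuns) run (y + 1) = y + 1 := by
          simp only [streakStart]
          rw [getD_map_rowRuns]
          simp [h]
        rw [hs]
    have hRrun : (if y + 1 < mask.length then rowRuns (mask.getD (y + 1) []) else [])
        = Rrow mask (y + 1) := rfl
    rw [hRrun, hfun,
      foldl_insert_fresh _ _ _ (nodup_Rrow mask (y + 1)) (by intro run _; simp)]
    have hnext : PySem.Dict.mk ((PySem.Dict.empty.items : List ((Int × Int) × Int)) ++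
        (Rrow mask (y + 1)).map
          (fun run => (run, (streakStart (mask.map rowRuns) run (y + 1) : Int))))
        = dictOf mask (y + 1) := rfl
    rw [hnext]
    refine Prod.ext ?_ rfl
    show ((dictOf mask y).items).foldl _ _ = _
    have hitems : (dictOf mask y).items = (Rrow mask y).map
        (fun run => (run, (streakStart (mask.map rowRuns) run y : Int))) := rfl
    rw [hitems, List.foldl_map]
    have hswap : (fun (r : List (Int × Int × Int × Int)) run =>
        if (dictOf mask (y + 1)).contains
            (run, (streakStart (mask.map rowRuns) run y : Int)).1 then r
        else r ++ [((run, (streakStart (mask.map rowRuns) run y : Int)).1.1,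
          (run, (streakStart (mask.map rowRuns) run y : Int)).2,
          (run, (streakStart (mask.map rowRuns) run y : Int)).1.2 -
            (run, (streakStart (mask.map rowRuns) run y : Int)).1.1,
          (((y + 1 : Nat)) : Int) -
            (run, (streakStart (mask.map rowRuns) run y : Int)).2)])
        = fun r run =>
          if (decide (run ∉ Rrow mask (y + 1))) = true then
            r ++ [(run.1, (streakStart (mask.map rowRuns) run y : Int),
              run.2 - run.1,
              (y : Int) + 1 - (streakStart (mask.map rowRuns) run y : Int))]
          else r := by
      funext r run
      rw [PySem.Dict.contains_eq_decide_mem_keys, keys_dictOf]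
      by_cases h : run ∈ Rrow mask (y + 1)
      · simp only [h, decide_true, if_pos, decide_not, Bool.not_true,
          Bool.false_eq_true, if_false]
      · simp only [h, decide_false, Bool.false_eq_true, if_false, decide_not,
          Bool.not_false, if_true, hcast]
    rw [hswap, PySem.List.foldl_append_if]
    congr 1
    simp only [termB]
    rw [getD_map_rowRuns mask (y + 1), getD_map_rowRuns mask y]
    have hg : (fun run : Int × Int =>
        if mask.length ≤ y + 1 ∨ run ∉ Rrow mask (y + 1) then
          some (run.1, (streakStart (mask.map rowRuns) run y : Int),
            run.2 - run.1,
            (y : Int) + 1 - (streakStart (mask.map rowRuns) run y : Int))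
        else none)
        = fun run =>
          if run ∉ Rrow mask (y + 1) then
            some (run.1, (streakStart (mask.map rowRuns) run y : Int),
              run.2 - run.1,
              (y : Int) + 1 - (streakStart (mask.map rowRuns) run y : Int))
          else none := by
      funext run
      by_cases h : run ∈ Rrow mask (y + 1)
      · have hlt : y + 1 < mask.length := by
          by_contra hc
          have hR : Rrow mask (y + 1) = [] := by unfold Rrow; rw [if_neg hc]
          rw [hR] at h
          exact absurd h List.not_mem_nil
        simp [h, show ¬(mask.length ≤ y + 1) from by omega]
      · simp [h]
    rw [hg, filterMap_ite]

-- ===== VERDICT (by name: the statement is the Claim_ definition above) =====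
theorem merge_runs_to_rects_spec : Claim_equal_merge_runs_to_rects := by
  intro mask _
  unfold Spec_merge_runs_to_rects merge_runs_to_rects merge_runs_to_rects_alt
  rw [loop_inv mask mask.length le_rfl]
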